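-- pv_equiv track=rewrite | github.com/ilovecrayons/ros2_ws | src/cvtest/cvtest/linreg.py | _cluster_by_x
-- ===== SOURCE A (Python) =====
-- X_CLUSTER_PX  = 10
--
-- def _cluster_by_x(infos, tol=X_CLUSTER_PX):
--     if not infos:
--         return []
--     infos_sorted = sorted(infos, key=lambda d: d['xc'])
--     clusters = []
--     current = [infos_sorted[0]]
--     last_x = infos_sorted[0]['xc']
--     for d in infos_sorted[1:]:
--         if abs(d['xc'] - last_x) <= tol:
--             current.append(d)
--         else:
--             clusters.append(current)
--             current = [d]
--         last_x = d['xc']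
--     clusters.append(current)
--     return clusters
-- ===== SOURCE B (Python) =====
-- X_CLUSTER_PX = 10
--
-- def _cluster_by_x(infos, tol=X_CLUSTER_PX):
--     infos_sorted = sorted(infos, key=lambda d: d['xc'])
--
--     def split(lst):
--         if not lst:
--             return []
--         i = 1
--         while i < len(lst) and lst[i]['xc'] - lst[i - 1]['xc'] <= tol:
--             i += 1
--         return [lst[:i]] + split(lst[i:])
--
--     return split(infos_sorted)
-- ===== Notes on version B (the rewrite author's own statement) =====
-- stated objective: alternative
-- what changed: A scans once with a clusters/current/last_x accumulator triple; B sorts and then recursively peels off the maximal prefix whose adjacent xc-gaps are <= tol, concatenating the slices (no accumulator state, no abs).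
import Mathlib
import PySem

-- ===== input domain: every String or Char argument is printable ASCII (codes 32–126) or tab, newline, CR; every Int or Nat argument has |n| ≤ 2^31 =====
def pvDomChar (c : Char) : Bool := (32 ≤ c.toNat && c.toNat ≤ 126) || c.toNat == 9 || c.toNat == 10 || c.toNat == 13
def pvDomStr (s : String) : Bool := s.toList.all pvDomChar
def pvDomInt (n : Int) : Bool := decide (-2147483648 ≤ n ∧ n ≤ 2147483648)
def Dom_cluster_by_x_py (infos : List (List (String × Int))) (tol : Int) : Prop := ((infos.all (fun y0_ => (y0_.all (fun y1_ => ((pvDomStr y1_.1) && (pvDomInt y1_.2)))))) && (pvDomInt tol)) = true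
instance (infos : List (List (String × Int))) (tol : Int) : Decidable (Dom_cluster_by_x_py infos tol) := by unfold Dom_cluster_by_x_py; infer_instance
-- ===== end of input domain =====

-- B replaces A's clusters/current/last_x accumulator scan by a recursive maximal-prefix split of the sorted list (alternative decomposition; same behaviour).

-- ===== PORT A =====
-- d['xc'] : first-match lookup; exact whenever the key is present (guaranteed by Pre_)
def pvXc (d : List (String × Int)) : Int := (List.lookup "xc" d).getD 0

-- the loop body of A, as a fold step over the state (clusters, current, last_x)
def pvStepA (tol : Int)
    (st : List (List (List (String × Int))) × List (List (String × Int)) × Int)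
    (d : List (String × Int)) :
    List (List (List (String × Int))) × List (List (String × Int)) × Int :=
  if |pvXc d - st.2.2| ≤ tol then (st.1, st.2.1 ++ [d], pvXc d)
  else (st.1 ++ [st.2.1], [d], pvXc d)

def cluster_by_x_py (infos : List (List (String × Int))) (tol : Int) : List (List (List (String × Int))) :=
  if infos = [] then []
  else
    match PySem.List.sorted infos pvXc false with
    | [] => []
    | h :: t =>
      let st := t.foldl (pvStepA tol) ([], [h], pvXc h)
      st.1 ++ [st.2.1]

-- ===== PORT B =====
-- the while loop of B's split: (lst[:i], lst[i:]) for the maximal i with all adjacent gaps ≤ tol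
def pvTakeChain (tol : Int) (last : Int) :
    List (List (String × Int)) → List (List (String × Int)) × List (List (String × Int))
  | [] => ([], [])
  | e :: es =>
    if pvXc e - last ≤ tol then
      let p := pvTakeChain tol (pvXc e) es
      (e :: p.1, p.2)
    else ([], e :: es)

lemma pvTakeChain_len (tol last : Int) (l : List (List (String × Int))) :
    (pvTakeChain tol last l).2.length ≤ l.length := by
  induction l generalizing last with
  | nil => simp [pvTakeChain]
  | cons e es ih =>
    simp only [pvTakeChain]
    split
    · exact le_trans (ih (pvXc e)) (Nat.le_succ _)
    · simp

def pvSplit (tol : Int) : List (List (String × Int)) → List (List (List (String × Int)))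
  | [] => []
  | d :: rest =>
    (d :: (pvTakeChain tol (pvXc d) rest).1) :: pvSplit tol (pvTakeChain tol (pvXc d) rest).2
termination_by l => l.length
decreasing_by
  exact Nat.lt_succ_of_le (pvTakeChain_len _ _ _)

def cluster_by_x_py_alt (infos : List (List (String × Int))) (tol : Int) : List (List (List (String × Int))) :=
  pvSplit tol (PySem.List.sorted infos pvXc false)

-- ===== PRECONDITION & SPEC =====
-- Pre_ excludes exactly the inputs where some dict lacks the key "xc", on which Python A raises KeyError.
def Pre_cluster_by_x_py (infos : List (List (String × Int))) (tol : Int) : Prop :=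
  infos.all (fun d => d.any (fun p => p.1 == "xc")) = true
instance (infos : List (List (String × Int))) (tol : Int) : Decidable (Pre_cluster_by_x_py infos tol) := by unfold Pre_cluster_by_x_py; infer_instance

def pvWitness_cluster_by_x_py : (List (List (String × Int))) × Int :=
  ([[("xc", 3), ("y", 1)], [("xc", 20)]], 10)

def Spec_cluster_by_x_py (infos : List (List (String × Int))) (tol : Int) (out : List (List (List (String × Int)))) : Prop := out = cluster_by_x_py_alt infos tol
instance (infos : List (List (String × Int))) (tol : Int) (out : List (List (List (String × Int)))) : Decidable (Spec_cluster_by_x_py infos tol out) := by unfold Spec_cluster_by_x_py; infer_instance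

-- ===== CLAIM (what is proved, stated in full; the proofs are below) =====
def Claim_equal_cluster_by_x_py : Prop := ∀ (infos : List (List (String × Int))) (tol : Int), Dom_cluster_by_x_py infos tol → Pre_cluster_by_x_py infos tol → Spec_cluster_by_x_py infos tol (cluster_by_x_py infos tol)

-- ===== LEMMAS AND PROOFS =====

-- A's fold, run from state (cl, cur, lx) over a key-sorted tail, produces exactly
-- cl, then cur extended by the maximal chain prefix, then B's split of the remainder.
lemma pvFoldA_eq (tol : Int) (t : List (List (String × Int))) :
    ∀ (cl : List (List (List (String × Int)))) (cur : List (List (String × Int))) (lx : Int),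
      (∀ p ∈ t.head?, lx ≤ pvXc p) →
      t.Pairwise (fun a b => pvXc a ≤ pvXc b) →
      (let st := t.foldl (pvStepA tol) (cl, cur, lx)
       st.1 ++ [st.2.1])
        = cl ++ (cur ++ (pvTakeChain tol lx t).1) :: pvSplit tol (pvTakeChain tol lx t).2 := by
  induction t with
  | nil => intro cl cur lx _ _; simp [pvTakeChain, pvSplit]
  | cons d ds ih =>
    intro cl cur lx hhead hchain
    have hle : lx ≤ pvXc d := hhead d (by simp)
    have habs : |pvXc d - lx| = pvXc d - lx := abs_of_nonneg (by omega)
    have hchain' : ds.Pairwise (fun a b => pvXc a ≤ pvXc b) :=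
      (List.pairwise_cons.mp hchain).2
    have hhead' : ∀ p ∈ ds.head?, pvXc d ≤ pvXc p := fun p hp =>
      (List.pairwise_cons.mp hchain).1 p (List.mem_of_mem_head? hp)
    simp only [List.foldl_cons, pvStepA, habs, pvTakeChain]
    by_cases hgap : pvXc d - lx ≤ tol
    · simp only [if_pos hgap]
      rw [ih cl (cur ++ [d]) (pvXc d) hhead' hchain']
      simp
    · simp only [if_neg hgap]
      rw [ih (cl ++ [cur]) [d] (pvXc d) hhead' hchain']
      simp [pvSplit]

-- ===== VERDICT (by name: the statement is the Claim_ definition above) =====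
theorem cluster_by_x_py_spec : Claim_equal_cluster_by_x_py := by
  unfold Claim_equal_cluster_by_x_py
  intro infos tol _ _
  unfold Spec_cluster_by_x_py cluster_by_x_py cluster_by_x_py_alt
  by_cases hnil : infos = []
  · subst hnil
    simp [PySem.List.sorted, pvSplit]
  · simp only [if_neg hnil]
    cases hs : PySem.List.sorted infos pvXc false with
    | nil => simp [pvSplit]
    | cons h t =>
      have hpw : (PySem.List.sorted infos pvXc false).Pairwise (fun a b => pvXc a ≤ pvXc b) :=
        PySem.List.sorted_pairwise infos pvXc
      rw [hs] at hpw
      have hhead : ∀ p ∈ t.head?, pvXc h ≤ pvXc p := by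
        intro p hp
        exact (List.pairwise_cons.mp hpw).1 p (List.mem_of_mem_head? hp)
      have hchain : t.Pairwise (fun a b => pvXc a ≤ pvXc b) :=
        (List.pairwise_cons.mp hpw).2
      have := pvFoldA_eq tol t [] [h] (pvXc h) hhead hchain
      simp only [List.nil_append] at this
      have hsplit : pvSplit tol (h :: t)
          = (h :: (pvTakeChain tol (pvXc h) t).1) :: pvSplit tol (pvTakeChain tol (pvXc h) t).2 := by
        rw [pvSplit]
      rw [hsplit]
      exact this.trans (by simp)
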